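-- pv_equiv track=rewrite | github.com/nguyenkhacduc/BaseTask | source/helpers/valid.py | invalid_author
-- ===== SOURCE A (Python) =====
-- def invalid_author(email, phone):
--     aa = 0
--     bb = 0
--     flag = True
--     for c in email:
--         if c == '@':
--             aa = aa + 1
--             flag = False
--         if flag == False and c == '.': bb = bb + 1
--
--     if aa != 1 or bb == 0: return True
--
--     aa = 0
--     for c in phone: aa = aa + 1
--     if aa != 10 or phone[0] != '0': return True
--     return False
-- ===== SOURCE B (Python) =====
-- def invalid_author(email, phone):
--     _, sep, tail = email.partition('@')
--     email_ok = sep == '@' and '@' not in tail and '.' in tail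
--     phone_ok = len(phone) == 10 and phone[0] == '0'
--     return not (email_ok and phone_ok)
-- ===== Notes on version B (the rewrite author's own statement) =====
-- stated objective: idiomatic
-- what changed: Replaces A's flag-driven single scan that counts '@'s and dots-after-'@' with a partition at the first '@' followed by two membership tests, and replaces the manual per-character length loop over phone with len(); the work moves from Python bytecode into C-level string primitives.
import Mathlib
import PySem

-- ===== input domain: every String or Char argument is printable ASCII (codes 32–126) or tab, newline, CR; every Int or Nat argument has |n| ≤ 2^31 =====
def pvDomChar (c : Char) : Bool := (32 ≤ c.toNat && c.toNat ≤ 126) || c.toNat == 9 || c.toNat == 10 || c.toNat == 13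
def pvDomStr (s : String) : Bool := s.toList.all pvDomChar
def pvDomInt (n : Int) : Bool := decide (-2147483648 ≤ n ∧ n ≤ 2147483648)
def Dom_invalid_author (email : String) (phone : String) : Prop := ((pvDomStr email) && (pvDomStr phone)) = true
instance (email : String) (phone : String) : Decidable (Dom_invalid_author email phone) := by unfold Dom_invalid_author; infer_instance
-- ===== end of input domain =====

-- B replaces A's flag-driven counting scan by a partition at the first '@' plus membership tests (idiomatic, same cost).

-- ===== PORT A =====
-- one iteration of A's email loop, state (aa, bb, flag)
def stepA (s : Nat × Nat × Bool) (c : Char) : Nat × Nat × Bool :=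
  let aa := if c = '@' then s.1 + 1 else s.1
  let flag := if c = '@' then false else s.2.2
  let bb := if flag = false ∧ c = '.' then s.2.1 + 1 else s.2.1
  (aa, bb, flag)

def invalid_author (email : String) (phone : String) : Bool :=
  let r := email.toList.foldl stepA (0, 0, true)
  if r.1 ≠ 1 ∨ r.2.1 = 0 then true
  else
    let aa := phone.toList.foldl (fun a _ => a + 1) 0
    if aa ≠ 10 ∨ ¬ (PySem.Str.pyGet? phone 0 = some '0') then true
    else false

-- ===== PORT B =====
def invalid_author_alt (email : String) (phone : String) : Bool :=
  -- email.partition('@'): the part before the first '@' (unused), then separator + tail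
  -- (exact for the 1-character separator '@'; empty match list = separator not found)
  let rest := email.toList.dropWhile (· != '@')
  let email_ok := match rest with
    | [] => false                                  -- sep == '' : no '@' in email
    | _ :: tail => !(tail.contains '@') && tail.contains '.'
  let phone_ok := (PySem.Str.len phone == 10) && (PySem.Str.pyGet? phone 0 == some '0')
  !(email_ok && phone_ok)

-- ===== PRECONDITION & SPEC =====
def Spec_invalid_author (email : String) (phone : String) (out : Bool) : Prop := out = invalid_author_alt email phone
instance (email : String) (phone : String) (out : Bool) : Decidable (Spec_invalid_author email phone out) := by unfold Spec_invalid_author; infer_instance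

-- ===== CLAIM (what is proved, stated in full; the proofs are below) =====
def Claim_equal_invalid_author : Prop := ∀ (email : String) (phone : String), Dom_invalid_author email phone → Spec_invalid_author email phone (invalid_author email phone)

-- ===== LEMMAS AND PROOFS =====

-- A's email loop after the first '@' has been seen: it just counts '@'s and '.'s
lemma loopA_false (cs : List Char) : ∀ (aa bb : Nat),
    cs.foldl stepA (aa, bb, false) = (aa + cs.count '@', bb + cs.count '.', false) := by
  induction cs with
  | nil => simp
  | cons c cs ih =>
    intro aa bb
    by_cases h1 : c = '@' <;> by_cases h2 : c = '.' <;>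
      simp_all [stepA] <;> omega

-- A's email loop from the initial state, phrased via the partition at the first '@'
lemma loopA_true (cs : List Char) : ∀ (aa bb : Nat),
    cs.foldl stepA (aa, bb, true) =
      match cs.dropWhile (· != '@') with
      | [] => (aa, bb, true)
      | _ :: t => (aa + 1 + t.count '@', bb + t.count '.', false) := by
  induction cs with
  | nil => simp
  | cons c cs ih =>
    intro aa bb
    by_cases h1 : c = '@'
    · subst h1
      simp [stepA, loopA_false]
    · have h2 : (c != '@') = true := by simp [h1]
      simp only [List.foldl_cons, List.dropWhile_cons, h2, if_pos]
      have : stepA (aa, bb, true) c = (aa, bb, true) := by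
        simp [stepA, h1]
      rw [this, ih]

-- the phone loop is just the length
lemma lenLoop (l : List Char) : ∀ (a : Nat), l.foldl (fun a _ => a + 1) a = a + l.length := by
  induction l with
  | nil => simp
  | cons c l ih => intro a; simp [ih]; omega

theorem invalid_author_spec : Claim_equal_invalid_author := by
  intro email phone _
  unfold Spec_invalid_author invalid_author invalid_author_alt
  rw [loopA_true, lenLoop]
  cases hd : email.toList.dropWhile (· != '@') with
  | nil => simp
  | cons c t =>
    simp only []
    have hcount : (1 + t.count '@' ≠ 1) ↔ (t.contains '@' = true) := by
      rw [List.contains_iff_mem, ← List.count_pos_iff]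
      omega
    have hdot : (t.count '.' = 0) ↔ ¬ (t.contains '.' = true) := by
      rw [List.contains_iff_mem, List.count_eq_zero]
    by_cases hA : t.contains '@' = true <;> by_cases hD : t.contains '.' = true <;>
      by_cases hL : phone.toList.length = 10 <;>
      by_cases hG : PySem.Str.pyGet? phone 0 = some '0' <;>
      simp_all [PySem.Str.len] <;> omega
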